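-- pv_equiv track=rewrite | github.com/aadp21/Buscador_de_informacion | main.py | _comparativo_rows
-- ===== SOURCE A (Python) =====
-- from typing import Dict, List
--
-- def _comparativo_rows(bases_rows: List[dict], dir_rows: List[dict]) -> List[dict]:
--     campos = set()
--     for r in bases_rows or []:
--         campos.update(r.keys())
--     for r in dir_rows or []:
--         campos.update(r.keys())
--     campos = [c for c in campos if c]
--
--     def _val(rows, campo):
--         if not rows:
--             return ""
--         vals = []
--         for r in rows:
--             vals.append(str(r.get(campo, "") or ""))
--         return " | ".join([v for v in vals if v != ""])
--
--     out = []
--     for c in sorted(campos):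
--         out.append({"Campo": c, "Bases POP": _val(bases_rows, c), "Directorio": _val(dir_rows, c)})
--     return out
-- ===== SOURCE B (Python) =====
-- from typing import Dict, List
--
-- def _comparativo_rows(bases_rows: List[dict], dir_rows: List[dict]) -> List[dict]:
--     # Single pass over each side's cells, grouping values per field in a dict.
--     grouped = ({}, {})
--     for g, rows in zip(grouped, (bases_rows or [], dir_rows or [])):
--         for r in rows:
--             for k, v in r.items():
--                 if k:
--                     g.setdefault(k, []).append(str(v or ""))
--     g0, g1 = grouped
--     out = []
--     for c in sorted(g0.keys() | g1.keys()):
--         out.append({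
--             "Campo": c,
--             "Bases POP": " | ".join(v for v in g0.get(c, []) if v != ""),
--             "Directorio": " | ".join(v for v in g1.get(c, []) if v != ""),
--         })
--     return out
-- ===== Notes on version B (the rewrite author's own statement) =====
-- stated objective: faster
-- what changed: B replaces A's per-field rescans of both row lists (F fields x R rows lookups) with one pass over each side's cells that groups values per field in a dict, then one sorted walk over the field set.
import Mathlib
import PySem

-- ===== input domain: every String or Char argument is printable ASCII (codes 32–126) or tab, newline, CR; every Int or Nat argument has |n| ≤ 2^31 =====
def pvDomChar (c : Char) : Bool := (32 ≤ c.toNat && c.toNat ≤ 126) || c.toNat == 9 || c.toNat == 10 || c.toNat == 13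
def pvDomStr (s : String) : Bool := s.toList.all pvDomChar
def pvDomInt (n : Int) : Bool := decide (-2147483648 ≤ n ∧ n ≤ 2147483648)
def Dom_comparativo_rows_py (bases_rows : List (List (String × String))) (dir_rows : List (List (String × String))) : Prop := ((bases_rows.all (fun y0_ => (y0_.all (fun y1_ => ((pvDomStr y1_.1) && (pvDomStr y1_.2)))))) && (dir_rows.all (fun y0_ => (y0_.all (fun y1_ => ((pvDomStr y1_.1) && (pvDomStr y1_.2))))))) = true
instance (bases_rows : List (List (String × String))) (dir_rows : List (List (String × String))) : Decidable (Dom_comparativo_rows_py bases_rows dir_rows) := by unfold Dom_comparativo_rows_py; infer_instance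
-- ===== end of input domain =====

-- B replaces A's per-field rescans of both row lists with one grouping pass over each
-- side's cells plus one sorted walk over the field set (objective: faster, asymptotic).

-- ===== PORT A =====
-- A's inner helper `_val(rows, campo)`; values are strings, so `str(r.get(campo, "") or "")`
-- is exactly `(ofList r).getD campo ""` (str of a string is itself, `"" or ""` is `""`).
def pvValA (rows : List (List (String × String))) (campo : String) : String :=
  if rows = [] then ""
  else
    let vals := rows.foldl (fun acc r => acc ++ [(PySem.Dict.ofList r).getD campo ""]) []
    PySem.Str.join " | " (vals.filter (fun v => v ≠ ""))

def comparativo_rows_py (bases_rows : List (List (String × String))) (dir_rows : List (List (String × String))) : List (List (String × String)) :=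
  -- campos = set(); campos.update(r.keys()) over both lists; [c for c in campos if c]
  let campos0 : PySem.Set String :=
    dir_rows.foldl (fun s r => s.update (PySem.Dict.ofList r).keys)
      (bases_rows.foldl (fun s r => s.update (PySem.Dict.ofList r).keys) PySem.Set.empty)
  let campos := campos0.filter (fun c => c ≠ "")
  -- for c in sorted(campos): out.append({...})
  (PySem.List.sorted campos (fun c => c)).foldl
    (fun out c => out ++
      [[("Campo", c), ("Bases POP", pvValA bases_rows c), ("Directorio", pvValA dir_rows c)]]) []

-- ===== PORT B =====
-- one pass over a side's cells: g.setdefault(k, []).append(v) for each non-empty key k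
def pvGroup (rows : List (List (String × String))) : PySem.Dict String (List String) :=
  rows.foldl (fun g r =>
      (PySem.Dict.ofList r).items.foldl
        (fun g p => if p.1 ≠ "" then g.modify p.1 [] (fun l => l ++ [p.2]) else g) g)
    PySem.Dict.empty

def comparativo_rows_py_alt (bases_rows : List (List (String × String))) (dir_rows : List (List (String × String))) : List (List (String × String)) :=
  let g0 := pvGroup bases_rows
  let g1 := pvGroup dir_rows
  (PySem.List.sorted (PySem.Set.union (PySem.Set.ofList g0.keys) g1.keys) (fun c => c)).map
    (fun c =>
      [("Campo", c),
       ("Bases POP", PySem.Str.join " | " ((g0.getD c []).filter (fun v => v ≠ ""))),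
       ("Directorio", PySem.Str.join " | " ((g1.getD c []).filter (fun v => v ≠ "")))])

-- ===== PRECONDITION & SPEC =====
def Spec_comparativo_rows_py (bases_rows : List (List (String × String))) (dir_rows : List (List (String × String))) (out : List (List (String × String))) : Prop := out = comparativo_rows_py_alt bases_rows dir_rows
instance (bases_rows : List (List (String × String))) (dir_rows : List (List (String × String))) (out : List (List (String × String))) : Decidable (Spec_comparativo_rows_py bases_rows dir_rows out) := by unfold Spec_comparativo_rows_py; infer_instance

-- ===== CLAIM (what is proved, stated in full; the proofs are below) =====
def Claim_equal_comparativo_rows_py : Prop := ∀ (bases_rows : List (List (String × String))) (dir_rows : List (List (String × String))), Dom_comparativo_rows_py bases_rows dir_rows → Spec_comparativo_rows_py bases_rows dir_rows (comparativo_rows_py bases_rows dir_rows)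

-- ===== LEMMAS AND PROOFS =====

-- all cells of a side, in traversal order (proof-only helper)
def pvCells (rows : List (List (String × String))) : List (String × String) :=
  rows.flatMap (fun r => (PySem.Dict.ofList r).items)

lemma pvGroup_eq (rows : List (List (String × String))) :
    pvGroup rows =
      ((pvCells rows).filter (fun p => decide (p.1 ≠ ""))).foldl
        (fun g p => g.modify p.1 [] (fun l => l ++ [p.2])) PySem.Dict.empty := by
  unfold pvGroup pvCells
  rw [← List.foldl_flatMap, PySem.List.foldl_ite_eq_foldl_filter]

lemma keys_pvGroup (rows : List (List (String × String))) :
    (pvGroup rows).keys =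
      PySem.Set.ofList (((pvCells rows).filter (fun p => decide (p.1 ≠ ""))).map Prod.fst) := by
  rw [pvGroup_eq,
    PySem.Dict.keys_foldl_modify_key _ Prod.fst [] (fun _ p l => l ++ [p.2]),
    PySem.Dict.keys_empty, PySem.Set.update_nil_left]

lemma mem_keys_pvGroup (rows : List (List (String × String))) (c : String) :
    c ∈ (pvGroup rows).keys ↔ c ≠ "" ∧ ∃ r ∈ rows, c ∈ (PySem.Dict.ofList r).keys := by
  rw [keys_pvGroup]
  simp only [PySem.Set.mem_ofList, List.mem_map, List.mem_filter, pvCells,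
    List.mem_flatMap, PySem.Dict.keys, decide_eq_true_eq]
  constructor
  · rintro ⟨p, ⟨⟨r, hr, hp⟩, hne⟩, rfl⟩
    exact ⟨hne, r, hr, ⟨p, hp, rfl⟩⟩
  · rintro ⟨hne, r, hr, p, hp, rfl⟩
    exact ⟨p, ⟨⟨r, hr, hp⟩, hne⟩, rfl⟩

lemma getD_pvGroup (rows : List (List (String × String))) (c : String) (hc : c ≠ "") :
    (pvGroup rows).getD c [] = ((pvCells rows).filter (fun p => p.1 == c)).map (fun p => p.2) := by
  rw [pvGroup_eq, PySem.Dict.getD_foldl_modify_append, PySem.Dict.getD_empty, List.nil_append,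
    List.filter_filter]
  congr 1
  apply List.filter_congr
  intro p _
  by_cases h : p.1 = c
  · simp [h, hc]
  · simp [h]

-- at most one cell of a dict matches a key: filter = find?
lemma pvFilter_eq_find?_toList (l : List (String × String)) (c : String)
    (h : (l.map Prod.fst).Nodup) :
    l.filter (fun p => p.1 == c) = (l.find? (fun p => p.1 == c)).toList := by
  induction l with
  | nil => rfl
  | cons x t ih =>
    simp only [List.map_cons, List.nodup_cons] at h
    rw [List.filter_cons, List.find?_cons]
    by_cases hx : x.1 = c
    · have hb : (x.1 == c) = true := by simp [hx]
      have ht : t.filter (fun p => p.1 == c) = [] := by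
        apply List.filter_eq_nil_iff.2
        intro p hp hpc
        apply h.1
        have : p.1 = c := by simpa using hpc
        rw [← hx] at this
        exact this ▸ List.mem_map_of_mem hp
      simp [hb, ht]
    · have hb : (x.1 == c) = false := by simp [hx]
      simp [hb, ih h.2]

lemma pvDictFilterItems (r : List (String × String)) (c : String) :
    (((PySem.Dict.ofList r).items.filter (fun p => p.1 == c)).map (fun p => p.2)) =
      ((PySem.Dict.ofList r).get? c).toList := by
  have hnd : (((PySem.Dict.ofList r).items.map Prod.fst)).Nodup := by
    have := PySem.Dict.nodup_keys_ofList (ν := String) r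
    simpa [PySem.Dict.keys] using this
  rw [pvFilter_eq_find?_toList _ _ hnd]
  cases h : List.find? (fun p => p.1 == c) (PySem.Dict.ofList r).items with
  | none => simp [PySem.Dict.get?, h]
  | some p => simp [PySem.Dict.get?, h]

lemma pvVals_eq (rows : List (List (String × String))) (c : String) :
    (((pvCells rows).filter (fun p => p.1 == c)).map (fun p => p.2)).filter (fun v => v ≠ "") =
      (rows.map (fun r => (PySem.Dict.ofList r).getD c "")).filter (fun v => v ≠ "") := by
  induction rows with
  | nil => rfl
  | cons r t ih =>
    have hD : (PySem.Dict.ofList r).getD c "" = ((PySem.Dict.ofList r).get? c).getD "" :=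
      PySem.Dict.getD_eq_get?_getD _ _ _
    simp only [pvCells] at ih ⊢
    rw [List.flatMap_cons, List.filter_append, List.map_append, List.filter_append,
      pvDictFilterItems, List.map_cons, List.filter_cons, ih, hD]
    cases h : (PySem.Dict.ofList r).get? c with
    | none => simp
    | some v => by_cases hv : v = "" <;> simp [hv]

lemma pvValA_eq (rows : List (List (String × String))) (c : String) (hc : c ≠ "") :
    pvValA rows c = PySem.Str.join " | " (((pvGroup rows).getD c []).filter (fun v => v ≠ "")) := by
  rw [getD_pvGroup _ _ hc, pvVals_eq]
  by_cases h : rows = []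
  · subst h; rfl
  · simp only [pvValA, if_neg h, PySem.List.foldl_append_singleton_eq_map, List.nil_append]

lemma pvMem_foldl_update (rows : List (List (String × String))) (s : PySem.Set String) (c : String) :
    c ∈ rows.foldl (fun s r => PySem.Set.update s (PySem.Dict.ofList r).keys) s ↔
      c ∈ s ∨ ∃ r ∈ rows, c ∈ (PySem.Dict.ofList r).keys := by
  induction rows generalizing s with
  | nil => simp
  | cons r t ih =>
    rw [List.foldl_cons, ih, PySem.Set.mem_update]
    simp only [List.mem_cons]
    constructor
    · rintro (⟨h | h⟩ | ⟨r', hr', h⟩)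
      · exact Or.inl h
      · exact Or.inr ⟨r, Or.inl rfl, h⟩
      · exact Or.inr ⟨r', Or.inr hr', h⟩
    · rintro (h | ⟨r', hr' | hr', h⟩)
      · exact Or.inl (Or.inl h)
      · exact Or.inl (Or.inr (hr' ▸ h))
      · exact Or.inr ⟨r', hr', h⟩

lemma pvNodup_foldl_update (rows : List (List (String × String))) (s : PySem.Set String)
    (h : List.Nodup s) :
    List.Nodup (rows.foldl (fun s r => PySem.Set.update s (PySem.Dict.ofList r).keys) s) := by
  induction rows generalizing s with
  | nil => exact h
  | cons r t ih => exact ih _ (PySem.Set.nodup_update _ _ h)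

theorem comparativo_rows_py_spec : Claim_equal_comparativo_rows_py := by
  intro bases_rows dir_rows _
  unfold Spec_comparativo_rows_py comparativo_rows_py comparativo_rows_py_alt
  rw [PySem.List.foldl_append_singleton_eq_map, List.nil_append]
  have hperm :
      ((dir_rows.foldl (fun s r => s.update (PySem.Dict.ofList r).keys)
          (bases_rows.foldl (fun s r => s.update (PySem.Dict.ofList r).keys)
            PySem.Set.empty)).filter (fun c => c ≠ "")).Perm
        (PySem.Set.union (PySem.Set.ofList (pvGroup bases_rows).keys) (pvGroup dir_rows).keys) := by
    rw [List.perm_ext_iff_of_nodup]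
    · intro c
      rw [List.mem_filter, pvMem_foldl_update, PySem.Set.mem_union, PySem.Set.mem_ofList,
        mem_keys_pvGroup, mem_keys_pvGroup, pvMem_foldl_update]
      simp only [PySem.Set.empty, List.not_mem_nil, false_or, decide_eq_true_eq]
      constructor
      · rintro ⟨h1 | h1, h2⟩
        · exact Or.inl ⟨h2, h1⟩
        · exact Or.inr ⟨h2, h1⟩
      · rintro (⟨h2, h1⟩ | ⟨h2, h1⟩)
        · exact ⟨Or.inl h1, h2⟩
        · exact ⟨Or.inr h1, h2⟩
    · exact List.Nodup.filter _
        (pvNodup_foldl_update _ _ (pvNodup_foldl_update _ _ List.nodup_nil))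
    · exact PySem.Set.nodup_union _ _ (PySem.Set.nodup_ofList _)
  rw [PySem.List.sorted_eq_sorted_of_perm _ _ _ (fun a b h => h) hperm]
  apply List.map_congr_left
  intro c hc
  have hcmem := (PySem.List.mem_sorted _ _ _ _).1 hc
  have hcne : c ≠ "" := by
    rcases (PySem.Set.mem_union _ _ _).1 hcmem with h | h
    · exact ((mem_keys_pvGroup _ _).1 ((PySem.Set.mem_ofList _ _).1 h)).1
    · exact ((mem_keys_pvGroup _ _).1 h).1
  rw [pvValA_eq _ _ hcne, pvValA_eq _ _ hcne]
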